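-- pv_equiv track=rewrite | github.com/lwneumann/SwitchController | V3/SlapCity/remote.py | get_movement
-- ===== SOURCE A (Python) =====
-- def get_movement(movements):
--     x_move = {'a': 0, 'd': 255}
--     y_move = {'w': 0, 's': 255}
--
--     x = 128
--     y = 128
--
--     for m in movements:
--         if m in x_move:
--             x = x_move[m] if x == 128 else 128
--         if m in y_move:
--             y = y_move[m] if y == 128 else 128
--
--     return "<", x, y
-- ===== SOURCE B (Python) =====
-- def get_movement(movements):
--     x_move = {'a': 0, 'd': 255}
--     y_move = {'w': 0, 's': 255}
--     xs = [m for m in movements if m in x_move]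
--     ys = [m for m in movements if m in y_move]
--     x = 128 if len(xs) % 2 == 0 else x_move[xs[-1]]
--     y = 128 if len(ys) % 2 == 0 else y_move[ys[-1]]
--     return "<", x, y
-- ===== Notes on version B (the rewrite author's own statement) =====
-- stated objective: simpler
-- what changed: Replaces the stateful toggle loop with a closed form: each coordinate is 128 when the count of its relevant keys is even, otherwise the mapped value of the last relevant key.
import Mathlib
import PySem

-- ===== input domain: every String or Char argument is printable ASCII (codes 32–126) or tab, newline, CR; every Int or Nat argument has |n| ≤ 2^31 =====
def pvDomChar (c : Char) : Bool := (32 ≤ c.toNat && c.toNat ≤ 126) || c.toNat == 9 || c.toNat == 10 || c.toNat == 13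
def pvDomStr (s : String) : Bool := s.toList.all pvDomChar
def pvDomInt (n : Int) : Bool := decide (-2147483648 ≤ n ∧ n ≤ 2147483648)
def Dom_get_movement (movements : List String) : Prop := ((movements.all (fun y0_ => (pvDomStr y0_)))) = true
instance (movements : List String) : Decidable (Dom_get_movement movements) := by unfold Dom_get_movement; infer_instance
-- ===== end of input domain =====

-- B replaces A's stateful toggle loop with a parity-and-last-relevant-key closed form (simpler).


-- ===== PORT A =====
def pvXMove : PySem.Dict String Int := PySem.Dict.ofList [("a", 0), ("d", 255)]
def pvYMove : PySem.Dict String Int := PySem.Dict.ofList [("w", 0), ("s", 255)]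

-- one iteration of A's for-loop body over the state (x, y)
def pvStepA (p : Int × Int) (m : String) : Int × Int :=
  let x := if (PySem.Dict.get? pvXMove m).isSome then
             (if p.1 = 128 then (PySem.Dict.get? pvXMove m).getD 0 else 128)
           else p.1
  let y := if (PySem.Dict.get? pvYMove m).isSome then
             (if p.2 = 128 then (PySem.Dict.get? pvYMove m).getD 0 else 128)
           else p.2
  (x, y)

def get_movement (movements : List String) : String × Int × Int :=
  let st := movements.foldl pvStepA (128, 128)
  ("<", st.1, st.2)

-- ===== PORT B =====
-- coordinate from the subsequence of relevant keys: 128 on even count, else mapped last key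
def pvCoordX (xs : List String) : Int :=
  if xs.length % 2 = 0 then 128
  else match xs.getLast? with
       | some "a" => 0
       | _ => 255

def pvCoordY (ys : List String) : Int :=
  if ys.length % 2 = 0 then 128
  else match ys.getLast? with
       | some "w" => 0
       | _ => 255

def get_movement_alt (movements : List String) : String × Int × Int :=
  let xs := movements.filter (fun m => m == "a" || m == "d")
  let ys := movements.filter (fun m => m == "w" || m == "s")
  ("<", pvCoordX xs, pvCoordY ys)

-- ===== PRECONDITION & SPEC =====
def Spec_get_movement (movements : List String) (out : String × Int × Int) : Prop := out = get_movement_alt movements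
instance (movements : List String) (out : String × Int × Int) : Decidable (Spec_get_movement movements out) := by unfold Spec_get_movement; infer_instance

-- ===== CLAIM (what is proved, stated in full; the proofs are below) =====
def Claim_equal_get_movement : Prop := ∀ (movements : List String), Dom_get_movement movements → Spec_get_movement movements (get_movement movements)

-- ===== LEMMAS AND PROOFS =====

-- if the x-count is odd, the last filtered key is "a" or "d"
theorem pvCoordX_last (ms : List String) (h : (ms.filter (fun m => m == "a" || m == "d")).length % 2 ≠ 0) :
    ∃ k, (ms.filter (fun m => m == "a" || m == "d")).getLast? = some k ∧ (k = "a" ∨ k = "d") := by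
  set xs := ms.filter (fun m => m == "a" || m == "d") with hxs
  have hne : xs ≠ [] := by
    intro hnil; rw [hnil] at h; simp at h
  obtain ⟨k, hk⟩ : ∃ k, xs.getLast? = some k :=
    Option.isSome_iff_exists.mp (List.getLast?_isSome.mpr hne)
  refine ⟨k, hk, ?_⟩
  have hmem : k ∈ xs := List.mem_of_getLast? hk
  have := List.of_mem_filter (by rw [hxs] at hmem; exact hmem)
  simp at this
  rcases this with h1 | h1 <;> [exact Or.inl h1; exact Or.inr h1]

theorem pvCoordY_last (ms : List String) (h : (ms.filter (fun m => m == "w" || m == "s")).length % 2 ≠ 0) :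
    ∃ k, (ms.filter (fun m => m == "w" || m == "s")).getLast? = some k ∧ (k = "w" ∨ k = "s") := by
  set ys := ms.filter (fun m => m == "w" || m == "s") with hys
  have hne : ys ≠ [] := by
    intro hnil; rw [hnil] at h; simp at h
  obtain ⟨k, hk⟩ : ∃ k, ys.getLast? = some k :=
    Option.isSome_iff_exists.mp (List.getLast?_isSome.mpr hne)
  refine ⟨k, hk, ?_⟩
  have hmem : k ∈ ys := List.mem_of_getLast? hk
  have := List.of_mem_filter (by rw [hys] at hmem; exact hmem)
  simp at this
  rcases this with h1 | h1 <;> [exact Or.inl h1; exact Or.inr h1]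

theorem pvStepX (ms : List String) (m : String) (hm : m = "a" ∨ m = "d") :
    pvCoordX (ms.filter (fun m => m == "a" || m == "d") ++ [m]) =
      (if pvCoordX (ms.filter (fun m => m == "a" || m == "d")) = 128
       then (if m = "a" then (0 : Int) else 255) else 128) := by
  set xs := ms.filter (fun m => m == "a" || m == "d") with hxs
  by_cases h : xs.length % 2 = 0
  · have h1 : pvCoordX xs = 128 := by simp [pvCoordX, h]
    rw [h1, if_pos rfl]
    unfold pvCoordX
    have hodd : (xs ++ [m]).length % 2 ≠ 0 := by
      simp only [List.length_append, List.length_cons, List.length_nil]; omega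
    rw [if_neg hodd, List.getLast?_concat]
    rcases hm with rfl | rfl <;> simp
  · obtain ⟨k, hk, hkad⟩ := pvCoordX_last ms h
    have h1 : pvCoordX xs ≠ 128 := by
      unfold pvCoordX
      rw [if_neg h, hxs, hk]
      rcases hkad with rfl | rfl <;> simp
    rw [if_neg h1]
    unfold pvCoordX
    have heven : (xs ++ [m]).length % 2 = 0 := by
      simp only [List.length_append, List.length_cons, List.length_nil]; omega
    rw [if_pos heven]

theorem pvStepY (ms : List String) (m : String) (hm : m = "w" ∨ m = "s") :
    pvCoordY (ms.filter (fun m => m == "w" || m == "s") ++ [m]) =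
      (if pvCoordY (ms.filter (fun m => m == "w" || m == "s")) = 128
       then (if m = "w" then (0 : Int) else 255) else 128) := by
  set ys := ms.filter (fun m => m == "w" || m == "s") with hys
  by_cases h : ys.length % 2 = 0
  · have h1 : pvCoordY ys = 128 := by simp [pvCoordY, h]
    rw [h1, if_pos rfl]
    unfold pvCoordY
    have hodd : (ys ++ [m]).length % 2 ≠ 0 := by
      simp only [List.length_append, List.length_cons, List.length_nil]; omega
    rw [if_neg hodd, List.getLast?_concat]
    rcases hm with rfl | rfl <;> simp
  · obtain ⟨k, hk, hkws⟩ := pvCoordY_last ms h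
    have h1 : pvCoordY ys ≠ 128 := by
      unfold pvCoordY
      rw [if_neg h, hys, hk]
      rcases hkws with rfl | rfl <;> simp
    rw [if_neg h1]
    unfold pvCoordY
    have heven : (ys ++ [m]).length % 2 = 0 := by
      simp only [List.length_append, List.length_cons, List.length_nil]; omega
    rw [if_pos heven]

theorem pv_main (ms : List String) :
    ms.foldl pvStepA (128, 128) =
      (pvCoordX (ms.filter (fun m => m == "a" || m == "d")),
       pvCoordY (ms.filter (fun m => m == "w" || m == "s"))) := by
  induction ms using List.reverseRecOn with
  | nil => simp [pvCoordX, pvCoordY]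
  | append_singleton ms m ih =>
    rw [List.foldl_append, ih]
    by_cases ha : m = "a"
    · subst ha
      rw [List.filter_append, List.filter_append]
      simp only [List.filter_cons, List.filter_nil]
      norm_num
      rw [pvStepX ms "a" (Or.inl rfl)]
      simp [pvStepA, pvXMove, pvYMove, PySem.Dict.ofList, PySem.Dict.update, PySem.Dict.insert, PySem.Dict.get?, PySem.Dict.empty]
    · by_cases hd : m = "d"
      · subst hd
        rw [List.filter_append, List.filter_append]
        simp only [List.filter_cons, List.filter_nil]
        norm_num
        rw [pvStepX ms "d" (Or.inr rfl)]
        simp [pvStepA, pvXMove, pvYMove, PySem.Dict.ofList, PySem.Dict.update, PySem.Dict.insert, PySem.Dict.get?, PySem.Dict.empty]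
      · by_cases hw : m = "w"
        · subst hw
          rw [List.filter_append, List.filter_append]
          simp only [List.filter_cons, List.filter_nil]
          norm_num
          rw [pvStepY ms "w" (Or.inl rfl)]
          simp [pvStepA, pvXMove, pvYMove, PySem.Dict.ofList, PySem.Dict.update, PySem.Dict.insert, PySem.Dict.get?, PySem.Dict.empty]
        · by_cases hs : m = "s"
          · subst hs
            rw [List.filter_append, List.filter_append]
            simp only [List.filter_cons, List.filter_nil]
            norm_num
            rw [pvStepY ms "s" (Or.inr rfl)]
            simp [pvStepA, pvXMove, pvYMove, PySem.Dict.ofList, PySem.Dict.update, PySem.Dict.insert, PySem.Dict.get?, PySem.Dict.empty]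
          · rw [List.filter_append, List.filter_append]
            simp only [List.filter_cons, List.filter_nil]
            have hpx : ((m == "a" || m == "d") = false) := by
              simp [ha, hd]
            have hpy : ((m == "w" || m == "s") = false) := by
              simp [hw, hs]
            rw [hpx, hpy]
            simp [pvStepA, pvXMove, pvYMove, PySem.Dict.ofList, PySem.Dict.update, PySem.Dict.insert, PySem.Dict.get?, PySem.Dict.empty]
            constructor
            · rintro (h1 | h1) <;> exact absurd h1.symm (by assumption)
            · rintro (h1 | h1) <;> exact absurd h1.symm (by assumption)

-- ===== VERDICT (by name: the statement is the Claim_ definition above) =====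
theorem get_movement_spec : Claim_equal_get_movement := by
  intro ms _
  unfold Spec_get_movement get_movement get_movement_alt
  rw [pv_main]
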